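-- pv_equiv track=rewrite | github.com/arrows-1011/CPro | AOJ/tools/test.py | isValidUser
-- ===== SOURCE A (Python) =====
-- def isValidUser(name):
--     for i in range(len(name)):
--         if ('a' <= name[i] and name[i] <= 'z'):
--             continue
--         elif ('A' <= name[i] and name[i] <= 'Z'):
--             continue
--         elif ('0' <= name[i] and name[i] <= '9'):
--             continue
--         elif name[i] == '_':
--             continue
--         return False
--
--     return True
-- ===== SOURCE B (Python) =====
-- import re
--
-- _USER_RE = re.compile(r'[A-Za-z0-9_]*\Z')
--
-- def isValidUser(name):
--     return _USER_RE.match(name) is not None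
-- ===== Notes on version B (the rewrite author's own statement) =====
-- stated objective: idiomatic
-- what changed: Replaced the index loop with its four sequential range branches and early return by a single precompiled regex full match of the character class [A-Za-z0-9_]*; the match runs in the regex engine's C code.
import Mathlib
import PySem

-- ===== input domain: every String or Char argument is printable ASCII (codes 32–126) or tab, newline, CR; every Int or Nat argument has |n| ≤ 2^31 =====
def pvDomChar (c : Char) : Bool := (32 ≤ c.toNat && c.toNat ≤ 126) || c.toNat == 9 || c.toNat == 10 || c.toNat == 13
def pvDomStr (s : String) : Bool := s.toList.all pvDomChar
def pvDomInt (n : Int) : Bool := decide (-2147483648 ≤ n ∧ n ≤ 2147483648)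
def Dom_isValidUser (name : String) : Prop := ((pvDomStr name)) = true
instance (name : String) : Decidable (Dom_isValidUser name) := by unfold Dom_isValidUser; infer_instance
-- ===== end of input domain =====

-- B replaces A's index loop over four sequential range branches by a single regex
-- full match of [A-Za-z0-9_]* (ported as: every character is in the class).


-- ===== PORT A =====
-- A's for-loop over indices, char by char, four branches in order, early return False.
def isValidUserLoop (cs : List Char) : Bool :=
  match cs with
  | [] => true
  | c :: rest =>
    if 'a' ≤ c && c ≤ 'z' then isValidUserLoop rest
    else if 'A' ≤ c && c ≤ 'Z' then isValidUserLoop rest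
    else if '0' ≤ c && c ≤ '9' then isValidUserLoop rest
    else if c = '_' then isValidUserLoop rest
    else false

def isValidUser (name : String) : Bool := isValidUserLoop name.toList

-- ===== PORT B =====
-- re.fullmatch('[A-Za-z0-9_]*', name): every character matches the class.
def pvUserClass (c : Char) : Bool :=
  ('A' ≤ c && c ≤ 'Z') || ('a' ≤ c && c ≤ 'z') || ('0' ≤ c && c ≤ '9') || c = '_'

def isValidUser_alt (name : String) : Bool := name.toList.all pvUserClass

-- ===== PRECONDITION & SPEC =====
def Spec_isValidUser (name : String) (out : Bool) : Prop := out = isValidUser_alt name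
instance (name : String) (out : Bool) : Decidable (Spec_isValidUser name out) := by unfold Spec_isValidUser; infer_instance

-- ===== CLAIM (what is proved, stated in full; the proofs are below) =====
def Claim_equal_isValidUser : Prop := ∀ (name : String), Dom_isValidUser name → Spec_isValidUser name (isValidUser name)

-- ===== LEMMAS AND PROOFS =====
theorem isValidUserLoop_eq_all (cs : List Char) : isValidUserLoop cs = cs.all pvUserClass := by
  induction cs with
  | nil => rfl
  | cons c rest ih =>
    simp only [isValidUserLoop, List.all_cons, pvUserClass, ih]
    split_ifs with h1 h2 h3 h4 <;> simp_all

-- ===== VERDICT (by name: the statement is the Claim_ definition above) =====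
theorem isValidUser_spec : Claim_equal_isValidUser := by
  intro name _
  unfold Spec_isValidUser isValidUser isValidUser_alt
  exact isValidUserLoop_eq_all name.toList
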